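-- pv_equiv track=rewrite | github.com/FastLED/FastLED | ci/tests/test_github_actions_security.py | _is_safe_permissions
-- ===== SOURCE A (Python) =====
-- from typing import Any, Optional
--
-- def _is_safe_permissions(permissions: dict[str, Any]) -> bool:
--     """Check if permissions are safe (no dangerous write access)."""
--     # List of dangerous write permissions
--     dangerous_write_permissions = [
--         "contents",  # Can modify repository contents
--         "metadata",  # Can modify repository metadata
--         "packages",  # Can publish packages
--         "pages",  # Can deploy to GitHub Pages
--         "deployments",  # Can create deployments
--         "security-events",  # Can create security events
--     ]
--
--     for perm, value in permissions.items():
--         if perm in dangerous_write_permissions and value == "write":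
--             return False
--
--     return True
-- ===== SOURCE B (Python) =====
-- def _is_safe_permissions(permissions):
--     """Check if permissions are safe (no dangerous write access)."""
--     dangerous_write_permissions = [
--         "contents",
--         "metadata",
--         "packages",
--         "pages",
--         "deployments",
--         "security-events",
--     ]
--     return not any(permissions.get(p) == "write" for p in dangerous_write_permissions)
-- ===== Notes on version B (the rewrite author's own statement) =====
-- stated objective: idiomatic
-- what changed: B inverts the traversal: instead of scanning every (key, value) item of the permissions dict and testing list membership, it iterates the fixed six dangerous names and does one dict lookup each inside a single not-any expression.
import Mathlib
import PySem

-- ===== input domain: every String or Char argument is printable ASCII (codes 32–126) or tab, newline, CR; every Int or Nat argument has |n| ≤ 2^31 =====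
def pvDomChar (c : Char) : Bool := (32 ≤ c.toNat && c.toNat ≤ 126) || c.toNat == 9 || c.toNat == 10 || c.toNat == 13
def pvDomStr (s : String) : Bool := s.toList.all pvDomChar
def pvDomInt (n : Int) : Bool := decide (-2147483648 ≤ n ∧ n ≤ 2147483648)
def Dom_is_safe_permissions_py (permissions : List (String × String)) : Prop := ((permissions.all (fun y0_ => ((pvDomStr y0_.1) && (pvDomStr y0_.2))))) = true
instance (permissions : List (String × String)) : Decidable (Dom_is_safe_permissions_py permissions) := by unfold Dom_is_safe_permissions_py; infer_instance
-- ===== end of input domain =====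

-- B inverts the traversal: it iterates the fixed list of dangerous permission names and looks each up in the dict, instead of scanning every dict item and testing list membership.
-- ===== PORT A =====
def pvDangerousA : List String :=
  ["contents", "metadata", "packages", "pages", "deployments", "security-events"]

-- the 'for perm, value in permissions.items():' loop of A
def pvALoop : List (String × String) → Bool
  | [] => true
  | (perm, value) :: rest =>
    if pvDangerousA.contains perm && value == "write" then false else pvALoop rest

def is_safe_permissions_py (permissions : List (String × String)) : Bool :=
  pvALoop permissions

-- ===== PORT B =====
def pvDangerousB : List String :=
  ["contents", "metadata", "packages", "pages", "deployments", "security-events"]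

def is_safe_permissions_py_alt (permissions : List (String × String)) : Bool :=
  !(pvDangerousB.any (fun p => (PySem.Dict.mk permissions).get? p == some "write"))

-- ===== PRECONDITION & SPEC =====
-- Pre_ excludes association lists with duplicate keys, which do not encode any Python dict
-- (a Python dict always has unique keys); there A scans all duplicates while B's lookup sees only the first.
def Pre_is_safe_permissions_py (permissions : List (String × String)) : Prop :=
  (permissions.map Prod.fst).Nodup
instance (permissions : List (String × String)) : Decidable (Pre_is_safe_permissions_py permissions) := by unfold Pre_is_safe_permissions_py; infer_instance

def pvWitness_is_safe_permissions_py : (List (String × String)) :=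
  [("contents", "read"), ("actions", "write")]

def Spec_is_safe_permissions_py (permissions : List (String × String)) (out : Bool) : Prop := out = is_safe_permissions_py_alt permissions
instance (permissions : List (String × String)) (out : Bool) : Decidable (Spec_is_safe_permissions_py permissions out) := by unfold Spec_is_safe_permissions_py; infer_instance

-- ===== CLAIM =====
def Claim_equal_is_safe_permissions_py : Prop := ∀ (permissions : List (String × String)), Dom_is_safe_permissions_py permissions → Pre_is_safe_permissions_py permissions → Spec_is_safe_permissions_py permissions (is_safe_permissions_py permissions)

-- ===== LEMMAS AND PROOFS =====

-- A's loop is the negated 'any' over the items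
theorem pvALoop_eq_any (l : List (String × String)) :
    pvALoop l = !(l.any (fun kv => pvDangerousA.contains kv.1 && kv.2 == "write")) := by
  induction l with
  | nil => rfl
  | cons kv rest ih =>
    obtain ⟨k, v⟩ := kv
    simp only [pvALoop, List.any_cons]
    cases h : (pvDangerousA.contains k && v == "write") <;> simp [ih]

-- with unique keys, the two existentials coincide
theorem pv_any_swap (perms : List (String × String))
    (h : (perms.map Prod.fst).Nodup) :
    perms.any (fun kv => pvDangerousA.contains kv.1 && kv.2 == "write")
      = pvDangerousB.any (fun p => (PySem.Dict.mk perms).get? p == some "write") := by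
  have hkeys : (PySem.Dict.mk perms).keys.Nodup := h
  rw [Bool.eq_iff_iff]
  simp only [List.any_eq_true, Bool.and_eq_true, List.contains_eq_mem, beq_iff_eq,
    decide_eq_true_eq, pvDangerousA, pvDangerousB]
  constructor
  · rintro ⟨⟨k, v⟩, hmem, hk, hv⟩
    refine ⟨k, hk, ?_⟩
    subst hv
    exact PySem.Dict.get?_of_mem_items _ hmem hkeys
  · rintro ⟨p, hp, hget⟩
    exact ⟨(p, "write"), PySem.Dict.mem_items_of_get?_eq_some _ hget, hp, rfl⟩

-- ===== VERDICT =====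
theorem is_safe_permissions_py_spec : Claim_equal_is_safe_permissions_py := by
  intro perms _ hpre
  show is_safe_permissions_py perms = is_safe_permissions_py_alt perms
  unfold is_safe_permissions_py is_safe_permissions_py_alt
  rw [pvALoop_eq_any, pv_any_swap perms hpre]
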